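-- pv_equiv track=rewrite | github.com/muminutanov/list_search | find08_min_count.py | find_min_count
-- ===== SOURCE A (Python) =====
-- def find_min_count(data):
--     """
--     Given the list of numbers, Find count of minimum numbers in the list
--     args:
--         data: list of numbers
--     returns: count of minimum numbers in the list
--     """
--     i=0
--     mx=0
--     ct=0
--     while i<len(data):
--         if mx>data[i]:
--             a=mx=data[i]
--             ct = data.count(mx)
--         i+=1
--     return ct
-- ===== SOURCE B (Python) =====
-- def find_min_count(data):
--     """One forward pass maintaining the running minimum and its count inline."""
--     cur_min = 0
--     count = 0
--     for x in data:
--         if x < cur_min: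
--             cur_min = x
--             count = 1
--         elif x == cur_min:
--             count += 1
--     return count if cur_min < 0 else 0
-- ===== Notes on version B (the rewrite author's own statement) =====
-- stated objective: faster
-- what changed: A rescans the whole list with data.count each time the running minimum decreases (quadratic on decreasing data); B maintains the minimum and its count incrementally in one pass.
import Mathlib
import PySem

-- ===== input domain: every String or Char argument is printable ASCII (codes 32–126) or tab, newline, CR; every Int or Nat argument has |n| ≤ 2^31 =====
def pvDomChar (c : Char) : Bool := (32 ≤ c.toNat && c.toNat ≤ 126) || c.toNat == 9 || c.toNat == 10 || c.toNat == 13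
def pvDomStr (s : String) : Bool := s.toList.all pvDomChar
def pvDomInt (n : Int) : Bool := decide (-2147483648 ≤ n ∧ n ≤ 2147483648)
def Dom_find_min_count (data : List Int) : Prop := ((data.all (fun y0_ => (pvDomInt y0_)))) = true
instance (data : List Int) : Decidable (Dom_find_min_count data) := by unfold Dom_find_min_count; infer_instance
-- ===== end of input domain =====

-- B replaces A's full-list recount (data.count) at each new minimum by one pass that
-- maintains the running minimum together with its running count (objective: faster).

-- ===== PORT A =====
-- A's 'while i < len(data)' visits data[0..] in order: ported as a fold over data with state (mx, ct).
def find_min_count (data : List Int) : Int :=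
  (data.foldl (fun (s : Int × Int) x =>
      if s.1 > x then (x, (PySem.List.count data x : Int)) else s) (0, 0)).2

-- ===== PORT B =====
def find_min_count_alt (data : List Int) : Int :=
  let s := data.foldl (fun (s : Int × Int) x =>
      if x < s.1 then (x, 1)
      else if x == s.1 then (s.1, s.2 + 1)
      else s) (0, 0)
  if s.1 < 0 then s.2 else 0

-- ===== PRECONDITION & SPEC =====
def Spec_find_min_count (data : List Int) (out : Int) : Prop := out = find_min_count_alt data
instance (data : List Int) (out : Int) : Decidable (Spec_find_min_count data out) := by unfold Spec_find_min_count; infer_instance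

-- ===== CLAIM (what is proved, stated in full; the proofs are below) =====
def Claim_equal_find_min_count : Prop := ∀ (data : List Int), Dom_find_min_count data → Spec_find_min_count data (find_min_count data)

-- ===== LEMMAS AND PROOFS =====

theorem foldl_min_le (l : List Int) (m : Int) : l.foldl min m ≤ m := by
  induction l generalizing m with
  | nil => simp
  | cons x t ih => exact le_trans (ih (min m x)) (min_le_left m x)

-- A's loop: the state over a suffix l, starting from (mx, ct) with mx ≤ 0 and ct correct,
-- ends at the minimum M = foldl min mx l together with the full-list count if M < 0.
theorem foldA_char (data : List Int) (l : List Int) (mx ct : Int)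
    (hmx : mx ≤ 0)
    (hneg : mx < 0 → ct = (PySem.List.count data mx : Int))
    (hzero : mx = 0 → ct = 0) :
    l.foldl (fun (s : Int × Int) x =>
        if s.1 > x then (x, (PySem.List.count data x : Int)) else s) (mx, ct)
      = (l.foldl min mx,
         if l.foldl min mx < 0 then (PySem.List.count data (l.foldl min mx) : Int) else 0) := by
  induction l generalizing mx ct with
  | nil =>
    simp only [List.foldl]
    rcases lt_or_eq_of_le hmx with h | h
    · simp [h, hneg h]
    · simp [h, hzero h]
  | cons x t ih =>
    simp only [List.foldl]
    by_cases h : mx > x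
    · rw [if_pos h]
      rw [ih x _ (by omega) (fun _ => rfl) (by omega)]
      simp [min_eq_right (le_of_lt h)]
    · rw [if_neg h]
      rw [ih mx ct hmx hneg hzero]
      simp [min_eq_left (by omega : mx ≤ x)]

-- B's loop: the state over a suffix l, starting from (m, c),
-- ends at (M, count of M in l) if the minimum dropped, else (m, c + count of m in l).
theorem foldB_char (l : List Int) (m c : Int) :
    l.foldl (fun (s : Int × Int) x =>
        if x < s.1 then (x, 1)
        else if x == s.1 then (s.1, s.2 + 1)
        else s) (m, c)
      = (l.foldl min m,
         if l.foldl min m < m then (PySem.List.count l (l.foldl min m) : Int)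
         else c + (PySem.List.count l m : Int)) := by
  induction l generalizing m c with
  | nil => simp [PySem.List.count_eq]
  | cons x t ih =>
    have hmin : t.foldl min (min m x) ≤ min m x := foldl_min_le t (min m x)
    simp only [List.foldl]
    by_cases h1 : x < m
    · rw [if_pos h1, ih]
      have hmx : min m x = x := min_eq_right (le_of_lt h1)
      rw [hmx] at hmin ⊢
      by_cases h2 : t.foldl min x < x
      · have hne : t.foldl min x ≠ x := ne_of_lt h2
        simp [h2, lt_trans h2 h1, PySem.List.count_eq, List.count_cons, Ne.symm hne, hne]
      · have heq : t.foldl min x = x := le_antisymm (by rw [← hmx] at hmin ⊢; exact hmin) (not_lt.1 h2)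
        simp [heq, h1, h2, PySem.List.count_eq, List.count_cons]
        omega
    · rw [if_neg h1]
      have hmx : min m x = m := min_eq_left (by omega)
      by_cases h2 : x = m
      · rw [if_pos (by simp [h2]), ih]
        rw [hmx] at hmin ⊢
        by_cases h3 : t.foldl min m < m
        · have hne : t.foldl min m ≠ x := by omega
          simp [h3, PySem.List.count_eq, List.count_cons, Ne.symm hne, hne]
        · have heq : t.foldl min m = m := le_antisymm hmin (not_lt.1 h3)
          simp [heq, h2, PySem.List.count_eq, List.count_cons]
          ring
      · rw [if_neg (by simp [h2]), ih]
        rw [hmx] at hmin ⊢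
        by_cases h3 : t.foldl min m < m
        · have hne : t.foldl min m ≠ x := by omega
          simp [h3, PySem.List.count_eq, List.count_cons, Ne.symm hne, hne]
        · have heq : t.foldl min m = m := le_antisymm hmin (not_lt.1 h3)
          have hne : x ≠ m := h2
          simp [heq, h3, PySem.List.count_eq, List.count_cons, hne, Ne.symm hne]

-- ===== VERDICT (by name: the statement is the Claim_ definition above) =====
theorem find_min_count_spec : Claim_equal_find_min_count := by
  intro data _
  unfold Spec_find_min_count find_min_count find_min_count_alt
  rw [foldA_char data data 0 0 le_rfl (by omega) (fun _ => rfl),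
      foldB_char data 0 0]
  have hle : data.foldl min 0 ≤ 0 := foldl_min_le data 0
  by_cases h : data.foldl min 0 < 0
  · simp [h]
  · have : data.foldl min 0 = 0 := le_antisymm hle (not_lt.1 h)
    simp [this]
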